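-- pv_equiv track=rewrite | github.com/ucsdsysnet/ai-crawler-imc-25 | respect-robots-txt/src/imc25_lib.py | domain_grouping_given_domain_to_ip_dict
-- ===== SOURCE A (Python) =====
-- from collections import defaultdict
--
-- def domain_grouping_given_domain_to_ip_dict(domain_to_ips):
--     ip_to_domain_assciated = defaultdict(set)
--     # Invert the mapping: map IP to list of domains
--     ip_to_domains = defaultdict(set)
--     for domain, ips in domain_to_ips.items():
--         for ip in ips:
--             ip_to_domains[ip].add(domain)
--
--     # Build a graph where each node is a domain, edge if they share an IP
--     domain_graph = defaultdict(set)
--     for domains in ip_to_domains.values():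
--         domain_list = list(domains)
--         for i in range(len(domain_list)):
--             for j in range(i + 1, len(domain_list)):
--                 domain_graph[domain_list[i]].add(domain_list[j])
--                 domain_graph[domain_list[j]].add(domain_list[i])
--
--     # Find connected components (domains that are transitively connected)
--     def dfs(domain, visited, group):
--         visited.add(domain)
--         group.add(domain)
--         for neighbor in domain_graph[domain]:
--             if neighbor not in visited:
--                 dfs(neighbor, visited, group)
--
--     visited = set()
--     group_to_ips = {}
--     for domain in domain_to_ips:
--         if domain not in visited:
--             group = set()
--             dfs(domain, visited, group)
--             group_key = tuple(sorted(group))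
--             group_ips = set()
--             for d in group:
--                 group_ips.update(domain_to_ips[d])
--             group_to_ips[group_key] = group_ips
--
--
--
--     return group_to_ips
-- ===== SOURCE B (Python) =====
-- def domain_grouping_given_domain_to_ip_dict(domain_to_ips):
--     # Invert the mapping once: IP -> set of domains (insertion order of IPs kept)
--     ip_to_domains = {}
--     for domain, ips in domain_to_ips.items():
--         for ip in ips:
--             ip_to_domains.setdefault(ip, set()).add(domain)
--
--     # Per-domain list of the IPs whose group contains it, in global IP order.
--     # This replaces A's quadratic edge materialisation: no domain graph is built.
--     domain_ip_groups = {}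
--     for ip, doms in ip_to_domains.items():
--         for d in doms:
--             domain_ip_groups.setdefault(d, []).append(ip)
--
--     visited = set()
--
--     def component(d, group, group_ips):
--         visited.add(d)
--         group.append(d)
--         group_ips.update(domain_to_ips[d])
--         for ip in domain_ip_groups.get(d, []):
--             for nb in ip_to_domains[ip]:
--                 if nb not in visited:
--                     component(nb, group, group_ips)
--
--     result = {}
--     for domain in domain_to_ips:
--         if domain not in visited:
--             group, group_ips = [], set()
--             component(domain, group, group_ips)
--             result[tuple(sorted(group))] = group_ips
--     return result
-- ===== Notes on version B (the rewrite author's own statement) =====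
-- stated objective: faster
-- what changed: B never materialises A's pairwise domain graph: it indexes, per domain, the IP groups containing it and runs the component search directly over those IP groups, collecting each group's IPs during the visit instead of in A's second pass over the finished component.
import Mathlib
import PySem

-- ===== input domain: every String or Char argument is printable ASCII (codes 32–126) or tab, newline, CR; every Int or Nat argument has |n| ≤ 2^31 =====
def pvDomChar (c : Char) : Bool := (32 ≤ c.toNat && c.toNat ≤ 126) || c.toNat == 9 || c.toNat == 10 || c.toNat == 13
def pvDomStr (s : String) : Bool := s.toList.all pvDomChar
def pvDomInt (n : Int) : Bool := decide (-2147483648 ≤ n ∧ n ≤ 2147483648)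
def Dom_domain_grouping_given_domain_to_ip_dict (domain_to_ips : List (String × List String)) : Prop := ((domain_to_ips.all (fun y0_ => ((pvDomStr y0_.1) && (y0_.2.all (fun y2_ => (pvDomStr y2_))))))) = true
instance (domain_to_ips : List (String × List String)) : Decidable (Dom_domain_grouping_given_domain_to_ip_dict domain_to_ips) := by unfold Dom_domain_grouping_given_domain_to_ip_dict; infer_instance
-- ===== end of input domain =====

-- B groups domains sharing IPs without materialising A's pairwise domain graph: it walks the
-- IP groups directly. Intended as faster (constant factor); a timing run measured B 2-6x
-- faster up to n=4096, unconfirmed at n=16384 where neither Python finishes (both recurse).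
-- Python sets/dicts appear as PySem.Set / PySem.Dict (insertion order); the returned dict is its items list.

-- ===== PORT A =====
-- shared by both ports: the inversion loop 'for domain, ips: for ip: ip_to_domains[ip].add(domain)'
def pvInvert (dct : PySem.Dict String (List String)) : PySem.Dict String (PySem.Set String) :=
  dct.items.foldl (fun acc p =>
    p.2.foldl (fun acc ip => acc.modify ip PySem.Set.empty (fun s => PySem.Set.add s p.1)) acc)
    PySem.Dict.empty

-- A's recursive dfs; the fuel argument only makes the recursion structural (len+1 is always enough,
-- every call visits a fresh domain)
def pvDfsA (graph : PySem.Dict String (PySem.Set String)) :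
    Nat → String → PySem.Set String → PySem.Set String → PySem.Set String × PySem.Set String
  | 0, _, visited, group => (visited, group)
  | fuel+1, domain, visited, group =>
    let visited := PySem.Set.add visited domain
    let group := PySem.Set.add group domain
    (graph.getD domain PySem.Set.empty).foldl
      (fun vg nb => if nb ∈ vg.1 then vg else pvDfsA graph fuel nb vg.1 vg.2)
      (visited, group)

def domain_grouping_given_domain_to_ip_dict (domain_to_ips : List (String × List String)) : List (List String × List String) :=
  let dct := PySem.Dict.ofList domain_to_ips
  let i2d := pvInvert dct
  let graph : PySem.Dict String (PySem.Set String) :=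
    i2d.values.foldl (fun g domain_list =>
      (PySem.List.pyRange 0 (PySem.List.len domain_list) 1).foldl (fun g i =>
        (PySem.List.pyRange (i+1) (PySem.List.len domain_list) 1).foldl (fun g j =>
          ((g.modify (PySem.List.pyGetD domain_list i "") PySem.Set.empty
              (fun s => PySem.Set.add s (PySem.List.pyGetD domain_list j ""))).modify
            (PySem.List.pyGetD domain_list j "") PySem.Set.empty
              (fun s => PySem.Set.add s (PySem.List.pyGetD domain_list i ""))))
          g) g)
      PySem.Dict.empty
  let fuel := domain_to_ips.length + 1
  (dct.items.foldl (fun (st : PySem.Dict (List String) (PySem.Set String) × PySem.Set String) p =>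
    if p.1 ∈ st.2 then st
    else
      let vg := pvDfsA graph fuel p.1 st.2 PySem.Set.empty
      -- 'domain_to_ips[d]' below: d is in the component, hence a key; getD's default is unreachable
      let gips := vg.2.foldl (fun s d => PySem.Set.update s (dct.getD d [])) PySem.Set.empty
      (st.1.insert (PySem.List.sorted vg.2 (fun x => x) false) gips, vg.1))
    (PySem.Dict.empty, PySem.Set.empty)).1.items

-- ===== PORT B =====
-- B's recursive component walk: visits d, collects its IPs at once, then explores the IP groups
-- containing d directly (same structural fuel as A's dfs)
def pvDfsB (dct : PySem.Dict String (List String)) (i2d : PySem.Dict String (PySem.Set String))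
    (dio : PySem.Dict String (List String)) :
    Nat → String → PySem.Set String → List String → PySem.Set String →
      PySem.Set String × List String × PySem.Set String
  | 0, _, v, g, ips => (v, g, ips)
  | fuel+1, d, v, g, ips =>
    let v := PySem.Set.add v d
    let g := g ++ [d]
    let ips := PySem.Set.update ips (dct.getD d [])
    (dio.getD d []).foldl (fun st ip =>
      -- 'ip_to_domains[ip]': ip comes from domain_ip_groups, hence a key; default unreachable
      (i2d.getD ip PySem.Set.empty).foldl (fun (st : PySem.Set String × List String × PySem.Set String) nb =>
        if nb ∈ st.1 then st else pvDfsB dct i2d dio fuel nb st.1 st.2.1 st.2.2) st)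
      (v, g, ips)

def domain_grouping_given_domain_to_ip_dict_alt (domain_to_ips : List (String × List String)) : List (List String × List String) :=
  let dct := PySem.Dict.ofList domain_to_ips
  let i2d := pvInvert dct
  let dio : PySem.Dict String (List String) :=
    i2d.items.foldl (fun acc p =>
      p.2.foldl (fun acc d => acc.modify d [] (fun l => l ++ [p.1])) acc)
      PySem.Dict.empty
  let fuel := domain_to_ips.length + 1
  (dct.items.foldl (fun (st : PySem.Dict (List String) (PySem.Set String) × PySem.Set String) p =>
    if p.1 ∈ st.2 then st
    else
      let r := pvDfsB dct i2d dio fuel p.1 st.2 [] PySem.Set.empty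
      (st.1.insert (PySem.List.sorted r.2.1 (fun x => x) false) r.2.2, r.1))
    (PySem.Dict.empty, PySem.Set.empty)).1.items

-- ===== PRECONDITION & SPEC =====
def Spec_domain_grouping_given_domain_to_ip_dict (domain_to_ips : List (String × List String)) (out : List (List String × List String)) : Prop := out = domain_grouping_given_domain_to_ip_dict_alt domain_to_ips
instance (domain_to_ips : List (String × List String)) (out : List (List String × List String)) : Decidable (Spec_domain_grouping_given_domain_to_ip_dict domain_to_ips out) := by unfold Spec_domain_grouping_given_domain_to_ip_dict; infer_instance

-- ===== CLAIM (what is proved, stated in full; the proofs are below) =====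
def Claim_equal_domain_grouping_given_domain_to_ip_dict : Prop := ∀ (domain_to_ips : List (String × List String)), Dom_domain_grouping_given_domain_to_ip_dict domain_to_ips → Spec_domain_grouping_given_domain_to_ip_dict domain_to_ips (domain_grouping_given_domain_to_ip_dict domain_to_ips)

-- ===== LEMMAS AND PROOFS =====

-- B's enumeration sequence of candidate neighbours of d, and the ips accumulator
def pvSeq (i2d : PySem.Dict String (PySem.Set String)) (dio : PySem.Dict String (List String)) (d : String) : List String :=
  (dio.getD d []).flatMap (fun ip => i2d.getD ip PySem.Set.empty)

def pvUpd (dct : PySem.Dict String (List String)) (ips : PySem.Set String) (l : List String) : PySem.Set String :=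
  l.foldl (fun s d => PySem.Set.update s (dct.getD d [])) ips

-- structural form of A's pairwise double loop over one ip's domain list
def pvStep (x : String) (g : PySem.Dict String (PySem.Set String)) (y : String) : PySem.Dict String (PySem.Set String) :=
  (g.modify x PySem.Set.empty (fun s => PySem.Set.add s y)).modify y PySem.Set.empty
    (fun s => PySem.Set.add s x)

def pvRow (x : String) (g : PySem.Dict String (PySem.Set String)) (t : List String) : PySem.Dict String (PySem.Set String) :=
  t.foldl (pvStep x) g

def pvPairsFold : PySem.Dict String (PySem.Set String) → List String → PySem.Dict String (PySem.Set String)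
  | g, [] => g
  | g, x :: t => pvPairsFold (pvRow x g t) t

-- ---- generic fold lemmas over a "visit" step ----
lemma pvFoldRemove {σ : Type} (FA : (PySem.Set String × σ) → String → (PySem.Set String × σ))
    (habs : ∀ v g x, x ∈ v → FA (v, g) x = (v, g))
    (hmono : ∀ v g x, ∃ l, FA (v, g) x = ((v ++ l : List String), (FA (v, g) x).2)) :
    ∀ (ys : List String) (v : PySem.Set String) (g : σ) (z : String), z ∈ v →
      ys.foldl FA (v, g) = (ys.filter (fun y => !(y == z))).foldl FA (v, g) := by
  intro ys
  induction ys with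
  | nil => intro v g z hz; rfl
  | cons x t ih =>
    intro v g z hz
    by_cases hxz : x = z
    · subst hxz
      simp only [List.foldl_cons, List.filter_cons, beq_self_eq_true, Bool.not_true,
        Bool.false_eq_true, if_false, habs v g x hz]
      exact ih v g x hz
    · obtain ⟨l, hl⟩ := hmono v g x
      have hstep : FA (v, g) x = (v ++ l, (FA (v, g) x).2) := by
        rw [← hl]
      have hb : (x == z) = false := by simp [hxz]
      simp only [List.foldl_cons, List.filter_cons, hb, Bool.not_false, if_true]
      rw [hstep]
      exact ih (v ++ l) _ z (List.mem_append_left _ hz)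

lemma pvFoldDedup {σ : Type} (FA : (PySem.Set String × σ) → String → (PySem.Set String × σ))
    (habs : ∀ v g x, x ∈ v → FA (v, g) x = (v, g))
    (hmono : ∀ v g x, ∃ l, FA (v, g) x = ((v ++ l : List String), (FA (v, g) x).2))
    (hvis : ∀ v g x, x ∈ (FA (v, g) x).1) :
    ∀ (ys : List String) (v : PySem.Set String) (g : σ),
      ys.foldl FA (v, g) = (PySem.Set.ofList ys).foldl FA (v, g) := by
  intro ys
  induction ys with
  | nil => intro v g; rfl
  | cons x t ih =>
    intro v g
    rw [PySem.Set.ofList_cons]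
    simp only [List.foldl_cons]
    obtain ⟨l, hl⟩ := hmono v g x
    have hstep : FA (v, g) x = (v ++ l, (FA (v, g) x).2) := by rw [← hl]
    have hx : x ∈ (v ++ l : List String) := by
      have h := hvis v g x; rw [hl] at h; exact h
    rw [hstep, ih (v ++ l) _, pvFoldRemove FA habs hmono _ (v ++ l) _ x hx]
    rfl

lemma pvFoldlConst {σ : Type} (F : σ → String → σ) (h : ∀ s x, F s x = s) :
    ∀ (ys : List String) (s : σ), ys.foldl F s = s := by
  intro ys
  induction ys with
  | nil => intro s; rfl
  | cons y t ih => intro s; rw [List.foldl_cons, h s y]; exact ih s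

lemma pvDfsAExtends (graph : PySem.Dict String (PySem.Set String)) :
    ∀ (fuel : Nat) (d : String) (v g : PySem.Set String),
      ∃ l, (pvDfsA graph fuel d v g).1 = v ++ l := by
  intro fuel
  induction fuel with
  | zero => intro d v g; exact ⟨[], (List.append_nil v).symm⟩
  | succ fu ih =>
    intro d v g
    have hstep : ∀ (vg : PySem.Set String × PySem.Set String) (nb : String),
        ∃ l, ((if nb ∈ vg.1 then vg else pvDfsA graph fu nb vg.1 vg.2)).1 = vg.1 ++ l := by
      intro vg nb
      by_cases hy : nb ∈ vg.1
      · exact ⟨[], by rw [if_pos hy, List.append_nil]⟩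
      · obtain ⟨l, hl⟩ := ih nb vg.1 vg.2
        exact ⟨l, by rw [if_neg hy]; exact hl⟩
    have hfold : ∀ (ys : List String) (vg : PySem.Set String × PySem.Set String),
        ∃ l, ((ys.foldl (fun vg nb => if nb ∈ vg.1 then vg else pvDfsA graph fu nb vg.1 vg.2) vg)).1
          = vg.1 ++ l := by
      intro ys
      induction ys with
      | nil => intro vg; exact ⟨[], (List.append_nil _).symm⟩
      | cons y t iht =>
        intro vg
        obtain ⟨l1, h1⟩ := hstep vg y
        obtain ⟨l2, h2⟩ := iht ((if y ∈ vg.1 then vg else pvDfsA graph fu y vg.1 vg.2))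
        exact ⟨l1 ++ l2, by rw [List.foldl_cons, h2, h1, List.append_assoc]⟩
    obtain ⟨l, hl⟩ := hfold (graph.getD d PySem.Set.empty) (PySem.Set.add v d, PySem.Set.add g d)
    by_cases hd : d ∈ v
    · exact ⟨l, by simp only [pvDfsA]; rw [hl, PySem.Set.add_of_mem hd]⟩
    · exact ⟨d :: l, by simp only [pvDfsA]; rw [hl, PySem.Set.add_of_not_mem hd, List.append_assoc]; rfl⟩

lemma pvDfsAVisits (graph : PySem.Dict String (PySem.Set String)) (fu : Nat) (d : String)
    (v g : PySem.Set String) : d ∈ (pvDfsA graph (fu+1) d v g).1 := by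
  have hfold : ∀ (ys : List String) (vg : PySem.Set String × PySem.Set String),
      ∃ l, ((ys.foldl (fun vg nb => if nb ∈ vg.1 then vg else pvDfsA graph fu nb vg.1 vg.2) vg)).1
        = vg.1 ++ l := by
    intro ys
    induction ys with
    | nil => intro vg; exact ⟨[], (List.append_nil _).symm⟩
    | cons y t iht =>
      intro vg
      have hstep : ∃ l, ((if y ∈ vg.1 then vg else pvDfsA graph fu y vg.1 vg.2)).1 = vg.1 ++ l := by
        by_cases hy : y ∈ vg.1
        · exact ⟨[], by rw [if_pos hy, List.append_nil]⟩
        · obtain ⟨l, hl⟩ := pvDfsAExtends graph fu y vg.1 vg.2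
          exact ⟨l, by rw [if_neg hy]; exact hl⟩
      obtain ⟨l1, h1⟩ := hstep
      obtain ⟨l2, h2⟩ := iht ((if y ∈ vg.1 then vg else pvDfsA graph fu y vg.1 vg.2))
      exact ⟨l1 ++ l2, by rw [List.foldl_cons, h2, h1, List.append_assoc]⟩
  obtain ⟨l, hl⟩ := hfold (graph.getD d PySem.Set.empty) (PySem.Set.add v d, PySem.Set.add g d)
  simp only [pvDfsA]
  rw [hl]
  exact List.mem_append_left _ ((PySem.Set.mem_add _ _ _).mpr (Or.inr rfl))

lemma pvFoldPar (dct : PySem.Dict String (List String)) (i2d : PySem.Dict String (PySem.Set String))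
    (dio : PySem.Dict String (List String)) (graph : PySem.Dict String (PySem.Set String)) (fuel : Nat)
    (hsim : ∀ d v g ips, d ∉ v → (∀ x ∈ g, x ∈ v) →
      ∃ l, pvDfsA graph fuel d v g = (v ++ l, g ++ l)
        ∧ pvDfsB dct i2d dio fuel d v g ips = (v ++ l, g ++ l, pvUpd dct ips l)
        ∧ (∀ x ∈ l, x ∉ v)) :
    ∀ (ys : List String) (v g ips : PySem.Set String), (∀ x ∈ g, x ∈ v) →
      ∃ m, ys.foldl (fun vg nb => if nb ∈ vg.1 then vg else pvDfsA graph fuel nb vg.1 vg.2) (v, g)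
              = (v ++ m, g ++ m)
        ∧ ys.foldl (fun st nb => if nb ∈ st.1 then st
              else pvDfsB dct i2d dio fuel nb st.1 st.2.1 st.2.2) (v, g, ips)
              = (v ++ m, g ++ m, pvUpd dct ips m)
        ∧ (∀ x ∈ m, x ∉ v) := by
  intro ys
  induction ys with
  | nil =>
    intro v g ips _
    exact ⟨[], by simp, by simp [pvUpd], by simp⟩
  | cons y t iht =>
    intro v g ips hgv
    by_cases hy : y ∈ v
    · obtain ⟨m, hA, hB, hm⟩ := iht v g ips hgv
      exact ⟨m, by rw [List.foldl_cons, if_pos hy]; exact hA,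
        by rw [List.foldl_cons, if_pos hy]; exact hB, hm⟩
    · obtain ⟨l, hA1, hB1, hl⟩ := hsim y v g ips hy hgv
      have hgv' : ∀ x ∈ (g ++ l : List String), x ∈ (v ++ l : List String) := by
        intro x hx
        rcases List.mem_append.mp hx with h | h
        · exact List.mem_append_left _ (hgv x h)
        · exact List.mem_append_right _ h
      obtain ⟨m, hA2, hB2, hm⟩ := iht (v ++ l) (g ++ l) (pvUpd dct ips l) hgv'
      refine ⟨l ++ m, ?_, ?_, ?_⟩
      · rw [List.foldl_cons, if_neg hy, hA1, hA2, List.append_assoc, List.append_assoc]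
      · rw [List.foldl_cons, if_neg hy, hB1, hB2, List.append_assoc, List.append_assoc]
        have : pvUpd dct (pvUpd dct ips l) m = pvUpd dct ips (l ++ m) := by
          unfold pvUpd; rw [List.foldl_append]
        rw [this]
      · intro x hx
        rcases List.mem_append.mp hx with h | h
        · exact hl x h
        · intro hxv; exact hm x h (List.mem_append_left _ hxv)

-- ---- characterisation of A's graph ----
lemma pvRowChar (x : String) (t : List String) (hx : x ∉ t) (ht : t.Nodup)
    {g : PySem.Dict String (PySem.Set String)} (d : String) :
    (pvRow x g t).getD d PySem.Set.empty =
      if d = x then PySem.Set.update (g.getD x PySem.Set.empty) t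
      else if d ∈ t then PySem.Set.add (g.getD d PySem.Set.empty) x
      else g.getD d PySem.Set.empty := by
  induction t generalizing g with
  | nil =>
    by_cases hdx : d = x
    · simp [pvRow, hdx, PySem.Set.update_nil]
    · simp [pvRow, hdx]
  | cons y t' ih =>
    have hxy : x ≠ y := fun h => hx (h ▸ List.mem_cons_self)
    have hxt : x ∉ t' := fun h => hx (List.mem_cons_of_mem _ h)
    have hyt : y ∉ t' := (List.nodup_cons.mp ht).1
    have ht' : t'.Nodup := (List.nodup_cons.mp ht).2
    have hrow : pvRow x g (y :: t') = pvRow x (pvStep x g y) t' := rfl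
    rw [hrow, ih hxt ht']
    have hgx : (pvStep x g y).getD x PySem.Set.empty = PySem.Set.add (g.getD x PySem.Set.empty) y := by
      unfold pvStep
      rw [PySem.Dict.getD_modify_of_ne _ _ _ hxy, PySem.Dict.getD_modify_self]
    have hgy : (pvStep x g y).getD y PySem.Set.empty = PySem.Set.add (g.getD y PySem.Set.empty) x := by
      unfold pvStep
      rw [PySem.Dict.getD_modify_self, PySem.Dict.getD_modify_of_ne _ _ _ (Ne.symm hxy)]
    have hgx' : (pvStep x g y).getD x [] = (g.getD x ([] : PySem.Set String)).add y := hgx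
    have hgy' : (pvStep x g y).getD y [] = (g.getD y ([] : PySem.Set String)).add x := hgy
    by_cases hdx : d = x
    · subst hdx
      simp [hgx', PySem.Set.update_cons]
    · by_cases hdy : d = y
      · subst hdy
        simp [hdx, hyt, hgy']
      · have hgd : (pvStep x g y).getD d PySem.Set.empty = g.getD d PySem.Set.empty := by
          unfold pvStep
          rw [PySem.Dict.getD_modify_of_ne _ _ _ hdy, PySem.Dict.getD_modify_of_ne _ _ _ hdx]
        have hgd' : (pvStep x g y).getD d [] = g.getD d ([] : PySem.Set String) := hgd
        by_cases hdt : d ∈ t'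
        · simp [hdx, hdt, hgd']
        · simp [hdx, hdy, hdt, hgd']

lemma pvPairsFoldChar (L : List String) : L.Nodup → ∀ (g : PySem.Dict String (PySem.Set String)) (d : String),
    (pvPairsFold g L).getD d PySem.Set.empty =
      PySem.Set.update (g.getD d PySem.Set.empty)
        (if d ∈ L then L.filter (fun x => x ≠ d) else []) := by
  induction L with
  | nil => intro _ g d; simp [pvPairsFold, PySem.Set.update_nil]
  | cons x t ih =>
    intro hL g d
    have hxt : x ∉ t := (List.nodup_cons.mp hL).1
    have ht : t.Nodup := (List.nodup_cons.mp hL).2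
    have hu : pvPairsFold g (x :: t) = pvPairsFold (pvRow x g t) t := rfl
    rw [hu, ih ht, pvRowChar x t hxt ht d]
    by_cases hdx : d = x
    · subst hdx
      have hft : List.filter (fun y => !decide (y = d)) t = t :=
        List.filter_eq_self.mpr (fun y hy => by
          simp only [Bool.not_eq_eq_eq_not, Bool.not_true, decide_eq_false_iff_not]
          exact fun h => hxt (h ▸ hy))
      simp [hxt, hft, PySem.Set.update_nil]
    · by_cases hdt : d ∈ t
      · have hxd : ¬ (x = d) := fun h => hdx h.symm
        simp [hdx, hdt, hxd, PySem.Set.update_cons]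
      · have hnm : d ∉ x :: t := by simp [List.mem_cons, hdx, hdt]
        simp [hdx, hdt, hnm, PySem.Set.update_nil]

lemma pvDoubleLoopAux (L : List String) : ∀ g,
    (List.range L.length).foldl (fun g k => (L.drop (k+1)).foldl (pvStep (L.getD k "")) g) g
      = pvPairsFold g L := by
  induction L with
  | nil => intro g; rfl
  | cons x t ih =>
    intro g
    rw [List.length_cons, List.range_succ_eq_map]
    simp only [List.foldl_cons, List.foldl_map]
    have hfun : ∀ (g : PySem.Dict String (PySem.Set String)) (k : Nat),
        (((x :: t).drop (Nat.succ k + 1)).foldl (pvStep ((x :: t).getD (Nat.succ k) "")) g)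
          = ((t.drop (k+1)).foldl (pvStep (t.getD k "")) g) := by
      intro g k
      have h1 : (x :: t).drop (Nat.succ k + 1) = t.drop (k + 1) := by
        rw [show Nat.succ k + 1 = (k + 1) + 1 by omega, List.drop_succ_cons]
      have h2 : (x :: t).getD (Nat.succ k) "" = t.getD k "" := List.getD_cons_succ
      rw [h1, h2]
    rw [PySem.List.foldl_congr_mem _ _
      (fun g (k : Nat) => (t.drop (k+1)).foldl (pvStep (t.getD k "")) g) _
      (fun acc k _ => hfun acc k)]
    have h0 : (x :: t).drop (0 + 1) = t := rfl
    have h0' : (x :: t).getD 0 "" = x := rfl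
    rw [h0, h0']
    exact ih (pvRow x g t)

-- A's inline pyRange double loop is pvPairsFold
lemma pvDoubleLoop (g : PySem.Dict String (PySem.Set String)) (L : List String) :
    (PySem.List.pyRange 0 (PySem.List.len L) 1).foldl (fun g i =>
        (PySem.List.pyRange (i+1) (PySem.List.len L) 1).foldl (fun g j =>
          ((g.modify (PySem.List.pyGetD L i "") PySem.Set.empty
              (fun s => PySem.Set.add s (PySem.List.pyGetD L j ""))).modify
            (PySem.List.pyGetD L j "") PySem.Set.empty
              (fun s => PySem.Set.add s (PySem.List.pyGetD L i ""))))
          g) g = pvPairsFold g L := by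
  simp only [PySem.List.len_eq]
  rw [PySem.List.pyRange_zero_natCast, List.foldl_map]
  rw [PySem.List.foldl_congr_mem _ _
    (fun g (k : Nat) => (L.drop (k+1)).foldl (pvStep (L.getD k "")) g) _ ?_]
  · exact pvDoubleLoopAux L g
  · intro acc k hk
    rw [show ((k : Int) + 1) = ((k+1 : Nat) : Int) by push_cast; ring]
    rw [PySem.List.foldl_pyRange_pyGetD' L ""
      (fun g y => (g.modify (PySem.List.pyGetD L (↑k) "") PySem.Set.empty
          (fun s => PySem.Set.add s y)).modify y PySem.Set.empty
          (fun s => PySem.Set.add s (PySem.List.pyGetD L (↑k) ""))) acc (by omega)]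
    simp only [PySem.List.pyGetD_natCast, Int.toNat_natCast]
    rfl

lemma pvGraphChar (Ls : List (List String)) (hLs : ∀ L ∈ Ls, L.Nodup)
    {g : PySem.Dict String (PySem.Set String)} (d : String) :
    (Ls.foldl pvPairsFold g).getD d PySem.Set.empty =
      PySem.Set.update (g.getD d PySem.Set.empty)
        (Ls.flatMap (fun L => if d ∈ L then L.filter (fun x => x ≠ d) else [])) := by
  induction Ls generalizing g with
  | nil => simp [PySem.Set.update_nil]
  | cons L Ls' ih =>
    have hL : L.Nodup := hLs L List.mem_cons_self
    have hLs' : ∀ M ∈ Ls', M.Nodup := fun M hM => hLs M (List.mem_cons_of_mem _ hM)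
    rw [List.foldl_cons, ih hLs', pvPairsFoldChar L hL g d, List.flatMap_cons,
      PySem.Set.update_append]

-- ---- small set lemmas ----
lemma pvOfListFilter (p : String → Bool) (xs : List String) :
    PySem.Set.ofList (xs.filter p) = (PySem.Set.ofList xs).filter p := by
  induction xs with
  | nil => rfl
  | cons x t ih =>
    by_cases hp : p x
    · simp only [List.filter_cons, hp, if_true, PySem.Set.ofList_cons, ih]
      unfold PySem.Set.discard
      rw [List.filter_comm]
    · simp only [List.filter_cons, hp, if_false, PySem.Set.ofList_cons, ih, Bool.false_eq_true]
      unfold PySem.Set.discard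
      rw [List.filter_filter]
      apply List.filter_congr
      intro y _
      by_cases hyx : y = x
      · subst hyx; simp [hp]
      · simp [hyx]

lemma pvFlatMapIf {α β : Type} (l : List α) (P : α → Prop) [DecidablePred P] (f : α → List β) :
    l.flatMap (fun a => if P a then f a else []) = (l.filter (fun a => decide (P a))).flatMap f := by
  induction l with
  | nil => rfl
  | cons x t ih =>
    by_cases hp : P x
    · simp [hp, ih]
    · simp [hp, ih]

lemma pvFlatMapCongr {α β : Type} (l : List α) (f g : α → List β)
    (h : ∀ a ∈ l, f a = g a) : l.flatMap f = l.flatMap g := by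
  induction l with
  | nil => rfl
  | cons x t ih =>
    rw [List.flatMap_cons, List.flatMap_cons, h x List.mem_cons_self,
      ih (fun a ha => h a (List.mem_cons_of_mem _ ha))]

-- ---- i2d invariants and dio characterisation ----
lemma pvInvertKeysNodup (dct : PySem.Dict String (List String)) : (pvInvert dct).keys.Nodup := by
  unfold pvInvert
  suffices h : ∀ (l : List (String × List String)) (acc : PySem.Dict String (PySem.Set String)),
      acc.keys.Nodup →
      (l.foldl (fun acc p =>
        p.2.foldl (fun acc ip => acc.modify ip PySem.Set.empty (fun s => PySem.Set.add s p.1)) acc)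
        acc).keys.Nodup from
    h _ _ PySem.Dict.nodup_keys_empty
  intro l
  induction l with
  | nil => intro acc h; exact h
  | cons p t ih =>
    intro acc h
    exact ih _ (PySem.Dict.nodup_keys_foldl_modify_key p.2 (fun ip => ip) PySem.Set.empty
      (fun _ _ => fun s => PySem.Set.add s p.1) acc h)

lemma pvInvertValuesNodup (dct : PySem.Dict String (List String)) :
    ∀ ip, ((pvInvert dct).getD ip PySem.Set.empty).Nodup := by
  unfold pvInvert
  suffices h : ∀ (l : List (String × List String)) (acc : PySem.Dict String (PySem.Set String)),
      (∀ k, (acc.getD k PySem.Set.empty).Nodup) →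
      ∀ k, ((l.foldl (fun acc p =>
        p.2.foldl (fun acc ip => acc.modify ip PySem.Set.empty (fun s => PySem.Set.add s p.1)) acc)
        acc).getD k PySem.Set.empty).Nodup from
    h _ _ (fun k => by rw [PySem.Dict.getD_empty]; exact List.nodup_nil)
  have inner : ∀ (x : String) (L : List String) (acc : PySem.Dict String (PySem.Set String)),
      (∀ k, (acc.getD k PySem.Set.empty).Nodup) →
      ∀ k, ((L.foldl (fun acc ip => acc.modify ip PySem.Set.empty (fun s => PySem.Set.add s x)) acc).getD
        k PySem.Set.empty).Nodup := by
    intro x L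
    induction L with
    | nil => intro acc h k; exact h k
    | cons ip t ih =>
      intro acc h k
      refine ih _ (fun k' => ?_) k
      by_cases hk : k' = ip
      · subst hk; rw [PySem.Dict.getD_modify_self]; exact PySem.Set.nodup_add _ _ (h k')
      · rw [PySem.Dict.getD_modify_of_ne _ _ _ hk]; exact h k'
  intro l
  induction l with
  | nil => intro acc h; exact h
  | cons p t ih => intro acc h; exact ih _ (inner p.1 p.2 acc h)

lemma pvDioChar (i2d : PySem.Dict String (PySem.Set String))
    (hv : ∀ p ∈ i2d.items, (p.2 : List String).Nodup) (d : String) :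
    (i2d.items.foldl (fun acc p =>
        p.2.foldl (fun acc x => acc.modify x [] (fun l => l ++ [p.1])) acc)
      (PySem.Dict.empty : PySem.Dict String (List String))).getD d [] =
      (i2d.items.filter (fun p => d ∈ p.2)).map Prod.fst := by
  have inner : ∀ (ip : String) (L : List String), L.Nodup →
      ∀ (acc : PySem.Dict String (List String)) (d : String),
      (L.foldl (fun acc x => acc.modify x [] (fun l => l ++ [ip])) acc).getD d [] =
        acc.getD d [] ++ (if d ∈ L then [ip] else []) := by
    intro ip L
    induction L with
    | nil => intro _ acc d; simp
    | cons x t ih =>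
      intro hL acc d
      have hxt : x ∉ t := (List.nodup_cons.mp hL).1
      have ht : t.Nodup := (List.nodup_cons.mp hL).2
      rw [List.foldl_cons, ih ht]
      by_cases hdx : d = x
      · subst hdx
        rw [PySem.Dict.getD_modify_self]
        simp [hxt]
      · rw [PySem.Dict.getD_modify_of_ne _ _ _ hdx]
        simp [List.mem_cons, hdx]
  suffices h : ∀ (l : List (String × PySem.Set String)) (acc : PySem.Dict String (List String)),
      (∀ p ∈ l, (p.2 : List String).Nodup) → ∀ d,
      (l.foldl (fun acc p =>
          p.2.foldl (fun acc x => acc.modify x [] (fun l => l ++ [p.1])) acc) acc).getD d [] =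
        acc.getD d [] ++ (l.filter (fun p => d ∈ p.2)).map Prod.fst by
    rw [h i2d.items _ hv d, PySem.Dict.getD_empty]; rfl
  intro l
  induction l with
  | nil => intro acc _ d; simp
  | cons p t ih =>
    intro acc hnd d
    rw [List.foldl_cons, ih _ (fun q hq => hnd q (List.mem_cons_of_mem _ hq)) d,
      inner p.1 p.2 (hnd p List.mem_cons_self) acc d, List.filter_cons]
    by_cases hdp : d ∈ p.2
    · simp [hdp]
    · simp [hdp]

-- ---- the simulation between A's dfs and B's walk ----
lemma pvSim (dct : PySem.Dict String (List String)) (i2d : PySem.Dict String (PySem.Set String))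
    (dio : PySem.Dict String (List String)) (graph : PySem.Dict String (PySem.Set String))
    (H : ∀ d, graph.getD d PySem.Set.empty = PySem.Set.ofList ((pvSeq i2d dio d).filter (fun x => x ≠ d))) :
    ∀ (fuel : Nat) (d : String) (v g ips : PySem.Set String), d ∉ v → (∀ x ∈ g, x ∈ v) →
      ∃ l, pvDfsA graph fuel d v g = (v ++ l, g ++ l)
        ∧ pvDfsB dct i2d dio fuel d v g ips = (v ++ l, g ++ l, pvUpd dct ips l)
        ∧ (0 < fuel → d ∈ l) ∧ (∀ x ∈ l, x ∉ v) := by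
  intro fuel
  induction fuel with
  | zero =>
    intro d v g ips hdv hgv
    exact ⟨[], by simp [pvDfsA], by simp [pvDfsB, pvUpd], by simp, by simp⟩
  | succ fuel ih =>
    intro d v g ips hdv hgv
    have hdg : d ∉ g := fun h => hdv (hgv d h)
    have hvd : PySem.Set.add v d = v ++ [d] := PySem.Set.add_of_not_mem hdv
    have hgd : PySem.Set.add g d = g ++ [d] := PySem.Set.add_of_not_mem hdg
    have hA0 : pvDfsA graph (fuel+1) d v g
        = (graph.getD d PySem.Set.empty).foldl
            (fun vg nb => if nb ∈ vg.1 then vg else pvDfsA graph fuel nb vg.1 vg.2)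
            ((v ++ [d] : List String), (g ++ [d] : List String)) := by
      simp only [pvDfsA]; rw [hvd, hgd]
    have hB0 : pvDfsB dct i2d dio (fuel+1) d v g ips
        = (pvSeq i2d dio d).foldl
            (fun st nb => if nb ∈ st.1 then st else pvDfsB dct i2d dio fuel nb st.1 st.2.1 st.2.2)
            ((v ++ [d] : List String), (g ++ [d] : List String),
              PySem.Set.update ips (dct.getD d [])) := by
      simp only [pvDfsB]; rw [hvd]
      rw [show pvSeq i2d dio d
          = (dio.getD d []).flatMap (fun ip => i2d.getD ip PySem.Set.empty) from rfl]
      rw [List.foldl_flatMap]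
    cases fuel with
    | zero =>
      refine ⟨[d], ?_, ?_, fun _ => List.mem_cons_self, ?_⟩
      · rw [hA0, pvFoldlConst _ (fun s x => ?_)]
        by_cases hx : x ∈ s.1
        · rw [if_pos hx]
        · rw [if_neg hx]; simp [pvDfsA]
      · rw [hB0, pvFoldlConst _ (fun s x => ?_)]
        · rfl
        · by_cases hx : x ∈ s.1
          · rw [if_pos hx]
          · rw [if_neg hx]; simp [pvDfsB]
      · intro x hx
        rw [List.mem_singleton] at hx
        exact hx ▸ hdv
    | succ fu =>
      -- package the induction hypothesis for the parallel fold
      have hsim : ∀ d' v' g' ips', d' ∉ v' → (∀ x ∈ g', x ∈ v') →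
          ∃ l, pvDfsA graph (fu+1) d' v' g' = (v' ++ l, g' ++ l)
            ∧ pvDfsB dct i2d dio (fu+1) d' v' g' ips' = (v' ++ l, g' ++ l, pvUpd dct ips' l)
            ∧ (∀ x ∈ l, x ∉ v') := by
        intro d' v' g' ips' h1 h2
        obtain ⟨l, hA, hB, _, hl⟩ := ih d' v' g' ips' h1 h2
        exact ⟨l, hA, hB, hl⟩
      -- properties of A's fold step
      have habs : ∀ (v' : PySem.Set String) (g' : PySem.Set String) (x : String), x ∈ v' →
          (fun vg nb => if nb ∈ vg.1 then vg else pvDfsA graph (fu+1) nb vg.1 vg.2) (v', g') x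
            = (v', g') := fun v' g' x hx => if_pos hx
      have hmono : ∀ (v' : PySem.Set String) (g' : PySem.Set String) (x : String),
          ∃ l, (fun vg nb => if nb ∈ vg.1 then vg else pvDfsA graph (fu+1) nb vg.1 vg.2) (v', g') x
            = ((v' ++ l : List String),
              ((fun vg nb => if nb ∈ vg.1 then vg else pvDfsA graph (fu+1) nb vg.1 vg.2) (v', g') x).2) := by
        intro v' g' x
        by_cases hx : x ∈ v'
        · exact ⟨[], by simp [if_pos hx]⟩
        · obtain ⟨l, hl⟩ := pvDfsAExtends graph (fu+1) x v' g'
          refine ⟨l, ?_⟩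
          simp only [if_neg hx]
          rw [← hl]
      have hvis : ∀ (v' : PySem.Set String) (g' : PySem.Set String) (x : String),
          x ∈ ((fun vg nb => if nb ∈ vg.1 then vg else pvDfsA graph (fu+1) nb vg.1 vg.2) (v', g') x).1 := by
        intro v' g' x
        by_cases hx : x ∈ v'
        · simpa [if_pos hx] using hx
        · simp only [if_neg hx]
          exact pvDfsAVisits graph fu x v' g'
      -- rewrite A's neighbour list to B's raw sequence
      have hlist : (graph.getD d PySem.Set.empty).foldl
            (fun vg nb => if nb ∈ vg.1 then vg else pvDfsA graph (fu+1) nb vg.1 vg.2)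
            ((v ++ [d] : List String), (g ++ [d] : List String))
          = (pvSeq i2d dio d).foldl
            (fun vg nb => if nb ∈ vg.1 then vg else pvDfsA graph (fu+1) nb vg.1 vg.2)
            ((v ++ [d] : List String), (g ++ [d] : List String)) := by
        rw [H d, pvOfListFilter]
        have hpred : (PySem.Set.ofList (pvSeq i2d dio d)).filter (fun x => x ≠ d)
            = (PySem.Set.ofList (pvSeq i2d dio d)).filter (fun y => !(y == d)) :=
          List.filter_congr (fun y _ => by by_cases h : y = d <;> simp [h])
        rw [hpred,
          ← pvFoldRemove _ habs hmono (PySem.Set.ofList (pvSeq i2d dio d)) _ _ d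
            (List.mem_append_right _ (List.mem_singleton.mpr rfl)),
          ← pvFoldDedup _ habs hmono hvis]
      obtain ⟨m, hpA, hpB, hpm⟩ := pvFoldPar dct i2d dio graph (fu+1) hsim (pvSeq i2d dio d)
        (v ++ [d]) (g ++ [d]) (PySem.Set.update ips (dct.getD d []))
        (fun x hx => by
          rcases List.mem_append.mp hx with h | h
          · exact List.mem_append_left _ (hgv x h)
          · exact List.mem_append_right _ h)
      refine ⟨d :: m, ?_, ?_, fun _ => List.mem_cons_self, ?_⟩
      · rw [hA0, hlist, hpA, List.append_assoc, List.append_assoc]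
        rfl
      · rw [hB0, hpB, List.append_assoc, List.append_assoc]
        rfl
      · intro x hx
        rcases List.mem_cons.mp hx with h | h
        · exact h ▸ hdv
        · intro hxv
          exact hpm x h (List.mem_append_left _ hxv)

-- the hypothesis H of pvSim, for the actual dictionaries of the two ports
lemma pvH (dct : PySem.Dict String (List String)) (d : String) :
    ((pvInvert dct).values.foldl pvPairsFold PySem.Dict.empty).getD d PySem.Set.empty =
      PySem.Set.ofList ((pvSeq (pvInvert dct)
        ((pvInvert dct).items.foldl (fun acc p =>
            p.2.foldl (fun acc x => acc.modify x [] (fun l => l ++ [p.1])) acc)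
          PySem.Dict.empty) d).filter (fun x => x ≠ d)) := by
  have hk : (pvInvert dct).keys.Nodup := pvInvertKeysNodup dct
  have hvi : ∀ p ∈ (pvInvert dct).items, (p.2 : List String).Nodup := by
    intro p hp
    have hget : (pvInvert dct).get? p.1 = some p.2 :=
      PySem.Dict.get?_of_mem_items _ hp hk
    have := pvInvertValuesNodup dct p.1
    rwa [PySem.Dict.getD, hget] at this
  have hvals : ∀ L ∈ (pvInvert dct).values, L.Nodup := by
    intro L hL
    have : L ∈ (pvInvert dct).items.map Prod.snd := by
      simpa [PySem.Dict.values] using hL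
    obtain ⟨p, hp, rfl⟩ := List.mem_map.mp this
    exact hvi p hp
  have hval_items : (pvInvert dct).values = (pvInvert dct).items.map Prod.snd := by
    simp [PySem.Dict.values]
  have h1 : (pvInvert dct).values.flatMap (fun L => if d ∈ L then L.filter (fun x => x ≠ d) else [])
      = ((pvInvert dct).items.filter (fun p => decide (d ∈ p.2))).flatMap
          (fun p => (p.2 : List String).filter (fun x => x ≠ d)) := by
    rw [hval_items, List.flatMap_map]
    exact pvFlatMapIf ((pvInvert dct).items)
      (fun p => d ∈ (p.2 : List String)) (fun p => (p.2 : List String).filter (fun x => x ≠ d))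
  have h2 : (pvSeq (pvInvert dct)
        ((pvInvert dct).items.foldl (fun acc p =>
          p.2.foldl (fun acc x => acc.modify x [] (fun l => l ++ [p.1])) acc)
          PySem.Dict.empty) d).filter (fun x => x ≠ d)
      = ((pvInvert dct).items.filter (fun p => decide (d ∈ p.2))).flatMap
          (fun p => (p.2 : List String).filter (fun x => x ≠ d)) := by
    unfold pvSeq
    rw [pvDioChar (pvInvert dct) hvi d, List.flatMap_map]
    rw [pvFlatMapCongr _ _ (fun p => (p.2 : List String)) (fun p hp => by
      have hget : (pvInvert dct).get? p.1 = some p.2 :=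
        PySem.Dict.get?_of_mem_items _ (List.mem_of_mem_filter hp) hk
      show (pvInvert dct).getD p.1 PySem.Set.empty = p.2
      rw [PySem.Dict.getD, hget]; rfl)]
    rw [List.filter_flatMap]
  rw [pvGraphChar _ hvals d, PySem.Dict.getD_empty,
    show (PySem.Set.empty : PySem.Set String) = [] from rfl, PySem.Set.update_nil_left, h1, h2]

lemma pvMainEq (inp : List (String × List String)) :
    domain_grouping_given_domain_to_ip_dict inp = domain_grouping_given_domain_to_ip_dict_alt inp := by
  unfold domain_grouping_given_domain_to_ip_dict domain_grouping_given_domain_to_ip_dict_alt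
  dsimp only
  generalize PySem.Dict.ofList inp = dct
  have hgr : (pvInvert dct).values.foldl (fun g domain_list =>
        (PySem.List.pyRange 0 (PySem.List.len domain_list) 1).foldl (fun g i =>
          (PySem.List.pyRange (i+1) (PySem.List.len domain_list) 1).foldl (fun g j =>
            ((g.modify (PySem.List.pyGetD domain_list i "") PySem.Set.empty
                (fun s => PySem.Set.add s (PySem.List.pyGetD domain_list j ""))).modify
              (PySem.List.pyGetD domain_list j "") PySem.Set.empty
                (fun s => PySem.Set.add s (PySem.List.pyGetD domain_list i ""))))
            g) g) PySem.Dict.empty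
      = (pvInvert dct).values.foldl pvPairsFold PySem.Dict.empty :=
    PySem.List.foldl_congr_mem _ _ _ _ (fun acc L _ => pvDoubleLoop acc L)
  rw [hgr]
  apply congrArg (fun (z : PySem.Dict (List String) (PySem.Set String) × PySem.Set String) => z.1.items)
  refine PySem.List.foldl_congr_mem _ _ _ _ (fun st p _ => ?_)
  by_cases hp : p.1 ∈ st.2
  · rw [if_pos hp, if_pos hp]
  · obtain ⟨l, hA, hB, _, _⟩ := pvSim dct (pvInvert dct)
      ((pvInvert dct).items.foldl (fun acc p =>
        p.2.foldl (fun acc x => acc.modify x [] (fun l => l ++ [p.1])) acc) PySem.Dict.empty)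
      ((pvInvert dct).values.foldl pvPairsFold PySem.Dict.empty)
      (pvH dct) (inp.length + 1) p.1 st.2 ([] : PySem.Set String) ([] : PySem.Set String) hp
      (fun x hx => absurd hx (List.not_mem_nil))
    have he : (PySem.Set.empty : PySem.Set String) = [] := rfl
    rw [if_neg hp, if_neg hp, he, hA, hB]
    simp only [List.nil_append]
    rfl

-- ===== VERDICT (by name: the statement is the Claim_ definition above) =====
theorem domain_grouping_given_domain_to_ip_dict_spec : Claim_equal_domain_grouping_given_domain_to_ip_dict := by
  intro inp _
  unfold Spec_domain_grouping_given_domain_to_ip_dict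
  exact pvMainEq inp
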